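-- pv_equiv track=rewrite | github.com/devang-vala/NLP-Lab | Assignment_10/wp.py | merge_pair_in_word
-- ===== SOURCE A (Python) =====
-- def merge_pair_in_word(symbols, pair):
--     """
--     Replace adjacent occurrences of pair in symbols by a single merged token.
--     """
--     merged = []
--     i = 0
--     while i < len(symbols):
--         if i < len(symbols) - 1 and (symbols[i], symbols[i+1]) == pair:
--             merged.append(symbols[i] + symbols[i+1])
--             i += 2
--         else:
--             merged.append(symbols[i])
--             i += 1
--     return merged
-- ===== SOURCE B (Python) =====
-- def merge_pair_in_word(symbols, pair):
--     """
--     Replace adjacent occurrences of pair in symbols by a single merged token.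
--     Look-behind single pass: compare each symbol with the last output element,
--     using a flag so a freshly merged token is never merged again.
--     """
--     output = []
--     just_merged = False
--     for s in symbols:
--         if output and not just_merged and (output[-1], s) == pair:
--             output[-1] = output[-1] + s
--             just_merged = True
--         else:
--             output.append(s)
--             just_merged = False
--     return output
-- ===== Notes on version B (the rewrite author's own statement) =====
-- stated objective: alternative
-- what changed: replaces the index-stepped look-ahead while loop (i += 2 on a merge) by a single look-behind for-loop that folds each symbol into an output accumulator guarded by a just_merged flag
import Mathlib
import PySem

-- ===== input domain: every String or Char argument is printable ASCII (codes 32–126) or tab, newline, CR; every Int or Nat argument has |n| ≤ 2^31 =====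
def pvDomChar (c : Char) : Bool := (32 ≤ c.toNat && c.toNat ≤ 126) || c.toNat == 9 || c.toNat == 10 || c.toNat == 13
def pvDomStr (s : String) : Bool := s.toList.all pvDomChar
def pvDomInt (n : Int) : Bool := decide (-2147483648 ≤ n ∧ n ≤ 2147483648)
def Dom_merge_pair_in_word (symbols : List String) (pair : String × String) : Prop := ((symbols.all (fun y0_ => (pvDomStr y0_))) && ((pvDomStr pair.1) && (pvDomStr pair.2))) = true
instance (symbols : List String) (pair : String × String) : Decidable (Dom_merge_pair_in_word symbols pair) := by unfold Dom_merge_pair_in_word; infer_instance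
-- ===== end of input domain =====

-- ===== PORT A =====
-- while loop over i: two elements left and they match pair -> merge and skip two; else emit one
def merge_pair_in_word (symbols : List String) (pair : String × String) : List String :=
  match symbols with
  | a :: b :: t =>
    if (a, b) = pair then (a ++ b) :: merge_pair_in_word t pair
    else a :: merge_pair_in_word (b :: t) pair
  | [a] => [a]
  | [] => []

-- ===== PORT B =====
-- Source B's loop body; the output list is kept reversed (head = Python output[-1])
def pvStepB (pair : String × String) (st : List String × Bool) (s : String) : List String × Bool :=
  match st with
  | (last :: rest, false) =>
    if (last, s) = pair then ((last ++ s) :: rest, true)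
    else (s :: last :: rest, false)
  | (out, _) => (s :: out, false)

def merge_pair_in_word_alt (symbols : List String) (pair : String × String) : List String :=
  (symbols.foldl (pvStepB pair) ([], false)).1.reverse

-- ===== PRECONDITION & SPEC =====
def Spec_merge_pair_in_word (symbols : List String) (pair : String × String) (out : List String) : Prop := out = merge_pair_in_word_alt symbols pair
instance (symbols : List String) (pair : String × String) (out : List String) : Decidable (Spec_merge_pair_in_word symbols pair out) := by unfold Spec_merge_pair_in_word; infer_instance

-- ===== CLAIM (what is proved, stated in full; the proofs are below) =====
def Claim_equal_merge_pair_in_word : Prop := ∀ (symbols : List String) (pair : String × String), Dom_merge_pair_in_word symbols pair → Spec_merge_pair_in_word symbols pair (merge_pair_in_word symbols pair)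

-- ===== LEMMAS AND PROOFS =====

-- ===== VERDICT (by name: the statement is the Claim_ definition above) =====
-- key invariant: from a state whose flag forces the next symbol to be emitted fresh,
-- B's fold produces A's result (reversed) on top of the accumulator
theorem pvFoldB_inv (pair : String × String) (l : List String) :
    ∀ acc : List String,
      (l.foldl (pvStepB pair) (acc, true)).1 = (merge_pair_in_word l pair).reverse ++ acc := by
  induction l using merge_pair_in_word.induct (pair := pair) with
  | case1 a b t hp ih =>
    intro acc
    simp only [List.foldl_cons, pvStepB, merge_pair_in_word, if_pos hp]
    simp [ih]
  | case2 a b t hp ih =>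
    intro acc
    have h := ih (a :: acc)
    simp only [List.foldl_cons, pvStepB] at h
    simp only [List.foldl_cons, pvStepB, if_neg hp]
    rw [h]
    simp [merge_pair_in_word, hp]
  | case3 a =>
    intro acc
    simp [pvStepB, merge_pair_in_word]
  | case4 =>
    intro acc
    simp [merge_pair_in_word]

theorem merge_pair_in_word_spec : Claim_equal_merge_pair_in_word := by
  intro symbols pair _
  unfold Spec_merge_pair_in_word merge_pair_in_word_alt
  cases symbols with
  | nil => simp [merge_pair_in_word]
  | cons a t =>
    have h := pvFoldB_inv pair (a :: t) []
    simp only [List.foldl_cons] at h ⊢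
    have hfst : pvStepB pair ([], false) a = pvStepB pair ([], true) a := rfl
    rw [hfst, h]
    simp
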